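-- pv_equiv track=rewrite | github.com/maximormz/GenoLab | algorithms/palindrome_finder.py | new_phrase
-- ===== SOURCE A (Python) =====
-- def new_phrase(text):
--     n = len(text)
--     e = 2 * n + 3
--
--     new_string = ["$"] * e
--     new_string[0] = "@"
--     new_string[-1] = "#"
--
--     for i in range(n):
--         new_string[2 * i + 2] = text[i]
--
--     return e, new_string
-- ===== SOURCE B (Python) =====
-- def new_phrase(text):
--     full = "$".join("@" + text + "#")
--     return len(full), list(full)
-- ===== Notes on version B (the rewrite author's own statement) =====
-- stated objective: idiomatic
-- what changed: B has no loop and no index writes at all: it forms the padded string '@'+text+'#' and lets str.join interleave the '$' separator between its characters, then returns its length and its character list, instead of preallocating a '$'-filled array of size 2n+3 and overwriting computed even indices and the endpoints.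
import Mathlib
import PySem

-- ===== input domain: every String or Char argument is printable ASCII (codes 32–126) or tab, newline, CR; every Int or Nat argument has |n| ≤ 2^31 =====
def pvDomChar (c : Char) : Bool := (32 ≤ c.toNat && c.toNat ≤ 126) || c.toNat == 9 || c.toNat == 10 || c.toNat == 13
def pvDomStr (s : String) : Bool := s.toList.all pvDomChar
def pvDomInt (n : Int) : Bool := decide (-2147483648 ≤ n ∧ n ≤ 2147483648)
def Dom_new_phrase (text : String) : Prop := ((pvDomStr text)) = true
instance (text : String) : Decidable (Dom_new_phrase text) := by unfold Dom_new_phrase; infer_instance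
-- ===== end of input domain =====

-- B pads the text as '@'+text+'#' and lets str.join interleave the '$' separator (no loop, no
-- index writes); A preallocates a '$'-filled array and overwrites computed indices. Same O(n) cost.

-- ===== PORT A =====
def new_phrase (text : String) : Int × List String :=
  let tl := text.toList
  let n := tl.length
  let e : Int := 2 * (n : Int) + 3
  let s0 := List.replicate (2 * n + 3) "$"
  let s1 := s0.set 0 "@"
  let s2 := s1.set (2 * n + 2) "#"          -- new_string[-1] = "#" (index e-1, always in range)
  let s3 := (List.range n).foldl (fun acc i => acc.set (2 * i + 2) (String.mk [tl[i]!])) s2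
  (e, s3)

-- ===== PORT B =====
def new_phrase_alt (text : String) : Int × List String :=
  let full := PySem.Chars.join ['$'] ((('@' :: text.toList) ++ ['#']).map (fun c => [c]))
  ((full.length : Int), full.map (fun c => String.mk [c]))

-- ===== PRECONDITION & SPEC =====
def Spec_new_phrase (text : String) (out : Int × List String) : Prop := out = new_phrase_alt text
instance (text : String) (out : Int × List String) : Decidable (Spec_new_phrase text out) := by unfold Spec_new_phrase; infer_instance

-- ===== CLAIM (what is proved, stated in full; the proofs are below) =====
def Claim_equal_new_phrase : Prop := ∀ (text : String), Dom_new_phrase text → Spec_new_phrase text (new_phrase text)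

-- ===== LEMMAS AND PROOFS =====

def pvInterleave (cs : List Char) : List String := cs.flatMap (fun c => ["$", String.mk [c]])

theorem pvInterleave_append (cs : List Char) (c : Char) :
    pvInterleave (cs ++ [c]) = pvInterleave cs ++ ["$", String.mk [c]] := by
  simp [pvInterleave]

theorem pvInterleave_length (cs : List Char) : (pvInterleave cs).length = 2 * cs.length := by
  induction cs with
  | nil => simp [pvInterleave]
  | cons c cs ih => simp [pvInterleave] at ih ⊢; omega

-- join with separator '$' over singleton chunks = head followed by '$'-interleaved tail
theorem join_sing (c : Char) (tl : List Char) :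
    PySem.Chars.join ['$'] ((c :: tl).map (fun x => [x]))
      = c :: tl.flatMap (fun x => ['$', x]) := by
  induction tl generalizing c with
  | nil => simp [PySem.Chars.join_singleton]
  | cons d tl ih =>
    rw [List.map_cons, List.map_cons, PySem.Chars.join_cons_cons]
    rw [show [d] :: tl.map (fun x => [x]) = (d :: tl).map (fun x => [x]) by simp, ih d]
    simp

-- A's loop of index writes, generalized over an arbitrary suffix
theorem a_loop (cs : List Char) (suf : List String) :
    (List.range cs.length).foldl (fun acc i => acc.set (2 * i + 2) (String.mk [cs[i]!]))
        ("@" :: List.replicate (2 * cs.length + 1) "$" ++ suf)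
      = "@" :: pvInterleave cs ++ ("$" :: suf) := by
  induction cs using List.reverseRecOn generalizing suf with
  | nil => simp [pvInterleave]
  | append_singleton cs c ih =>
    have hn : (cs ++ [c]).length = cs.length + 1 := by simp
    rw [hn, List.range_succ, List.foldl_append]
    have hrep : List.replicate (2 * (cs.length + 1) + 1) "$"
        = List.replicate (2 * cs.length + 1) "$" ++ ["$", "$"] := by
      rw [show 2 * (cs.length + 1) + 1 = (2 * cs.length + 1) + 2 by omega, List.replicate_add]; rfl
    have hcongr : (List.range cs.length).foldl
        (fun acc i => acc.set (2 * i + 2) (String.mk [(cs ++ [c])[i]!]))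
        ("@" :: List.replicate (2 * (cs.length + 1) + 1) "$" ++ suf)
        = (List.range cs.length).foldl
          (fun acc i => acc.set (2 * i + 2) (String.mk [cs[i]!]))
          ("@" :: List.replicate (2 * (cs.length + 1) + 1) "$" ++ suf) := by
      apply PySem.List.foldl_congr_mem
      intro acc i hi
      have hi' : i < cs.length := List.mem_range.mp hi
      have : (cs ++ [c])[i]! = cs[i]! := by
        rw [getElem!_pos _ i (by simp; omega), getElem!_pos _ i hi', List.getElem_append_left hi']
      rw [this]
    rw [hcongr]
    have hinit : ("@" :: List.replicate (2 * (cs.length + 1) + 1) "$" ++ suf)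
        = ("@" :: List.replicate (2 * cs.length + 1) "$" ++ ("$" :: "$" :: suf)) := by
      simp [hrep]
    rw [hinit, ih ("$" :: "$" :: suf)]
    have hlast : (cs ++ [c])[cs.length]! = c := by
      rw [getElem!_pos _ _ (by simp)]
      simp
    simp only [List.foldl_cons, List.foldl_nil, hlast]
    have hL : ("@" :: pvInterleave cs ++ ("$" :: "$" :: "$" :: suf))
        = ("@" :: pvInterleave cs ++ ["$"]) ++ ("$" :: "$" :: suf) := by simp
    have hlen1 : ("@" :: pvInterleave cs ++ ["$"]).length = 2 * cs.length + 2 := by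
      simp [pvInterleave_length]
    rw [hL, List.set_append_right _ _ (by omega)]
    have hidx : 2 * cs.length + 2 - ("@" :: pvInterleave cs ++ ["$"]).length = 0 := by
      rw [hlen1]; omega
    rw [hidx]
    simp [pvInterleave_append]

theorem a_init (n : ℕ) :
    ((List.replicate (2 * n + 3) "$").set 0 "@").set (2 * n + 2) "#"
      = "@" :: List.replicate (2 * n + 1) "$" ++ ["#"] := by
  have h3 : 2 * n + 3 = (2 * n + 2) + 1 := by omega
  have : List.replicate (2 * n + 3) "$" = "$" :: (List.replicate (2 * n + 1) "$" ++ ["$"]) := by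
    rw [h3, List.replicate_succ]
    congr 1
    rw [show 2 * n + 2 = (2 * n + 1) + 1 by omega, List.replicate_succ']
  rw [this]
  simp only [List.set_cons_zero, List.set_cons_succ]
  congr 1
  rw [List.set_append_right _ _ (by simp)]
  simp

-- ===== VERDICT (by name: the statement is the Claim_ definition above) =====
theorem new_phrase_spec : Claim_equal_new_phrase := by
  intro text _
  show _ = _
  unfold new_phrase new_phrase_alt
  simp only
  rw [a_init, a_loop, show ('@' :: text.toList ++ ['#']) = '@' :: (text.toList ++ ['#']) by simp, join_sing '@' (text.toList ++ ['#'])]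
  refine Prod.ext ?_ ?_
  · show (2 * (text.toList.length : Int) + 3) = _
    simp
    ring
  · simp [pvInterleave, List.map_flatMap]
    exact ⟨rfl, rfl⟩
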